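-- pv_equiv track=rewrite | github.com/Rodrigo240502/ADA-LAB | Lab11/FindingBorders.py | compute_hash_faster
-- ===== SOURCE A (Python) =====
-- def compute_hash_faster(s):
--     n = len(s)
--     p = 53
--     m = 10 ** 9 + 9
--
--     # Pre-procesamos las potencias de 31
--     power_mod = [1]
--     for i in range(1, n):
--         power_mod.append((power_mod[-1] * p) % m)
--
--     # Obtenemos los hashValues de los prefijos
--     hash_values = [0] * (n + 1)
--     for i in range(n):
--         hash_values[i + 1] = (hash_values[i] + (ord(s[i]) - ord("a") + 1) * power_mod[i]) % m
--     return hash_values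
-- ===== SOURCE B (Python) =====
-- def compute_hash_faster(s):
--     m = 10 ** 9 + 9
--
--     def solve(t):
--         # returns (prefix hash values of t, 53 ** len(t) % m)
--         if not t:
--             return [0], 1
--         if len(t) == 1:
--             return [0, (ord(t) - 96) % m], 53
--         k = len(t) // 2
--         hu, pu = solve(t[:k])
--         hv, pv = solve(t[k:])
--         return hu + [(hu[-1] + pu * h) % m for h in hv[1:]], (pu * pv) % m
--
--     return solve(s)[0]
-- ===== Notes on version B (the rewrite author's own statement) =====
-- stated objective: alternative
-- what changed: Replaced the powers-table-then-index-writing-scan with a divide-and-conquer: recursively hash the two halves (each call also returning 53^len % m) and splice the right half's prefix hashes onto the left half's using the left hash and half-length power.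
import Mathlib
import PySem

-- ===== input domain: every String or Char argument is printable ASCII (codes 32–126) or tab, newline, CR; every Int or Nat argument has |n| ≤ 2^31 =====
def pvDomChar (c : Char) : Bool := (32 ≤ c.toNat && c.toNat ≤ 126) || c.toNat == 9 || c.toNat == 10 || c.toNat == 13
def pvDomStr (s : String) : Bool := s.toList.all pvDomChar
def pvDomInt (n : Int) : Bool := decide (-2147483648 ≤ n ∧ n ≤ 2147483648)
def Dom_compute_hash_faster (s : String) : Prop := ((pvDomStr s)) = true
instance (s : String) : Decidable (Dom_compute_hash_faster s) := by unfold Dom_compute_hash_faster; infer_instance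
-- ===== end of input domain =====

-- B replaces A's powers-table-then-scan with a divide-and-conquer: hash the two halves
-- recursively and splice the right half's hashes using the half-length power
-- (objective: alternative); same return value for every string.

-- modulus 10^9 + 9
def pvM : Int := 1000000009

-- ord(c) - ord('a') + 1
def pvVal (c : Char) : Int := (c.toNat : Int) - 97 + 1

-- ===== PORT A =====
def compute_hash_faster (s : String) : List Int :=
  let n := s.toList.length
  -- power_mod = [1]; for i in range(1, n): power_mod.append((power_mod[-1] * p) % m)
  let power_mod := (List.range' 1 (n - 1)).foldl
    (fun acc _ => acc ++ [PySem.Int.mod (acc.getLast! * 53) pvM]) [1]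
  -- hash_values = [0]*(n+1); for i in range(n): hash_values[i+1] = (hash_values[i] + v*power_mod[i]) % m
  (List.range n).foldl
    (fun hv i =>
      hv.set (i + 1)
        (PySem.Int.mod (hv.getD i 0 + pvVal (s.toList.getD i ' ') * power_mod.getD i 0) pvM))
    (List.replicate (n + 1) 0)

-- ===== PORT B =====
-- solve(t): returns (prefix hashes of t, 53**len(t) % m).
-- t[:k], t[k:] with 0 ≤ k ≤ len(t) are exactly take/drop; hv[1:] is drop 1;
-- hu[-1] on the always-nonempty hu is getLast!.
def pvSolve : List Char → List Int × Int
  | [] => ([0], 1)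
  | [c] => ([0, PySem.Int.mod (pvVal c) pvM], 53)
  | c1 :: c2 :: rest =>
    let l := c1 :: c2 :: rest
    let k := l.length / 2
    let hu_pu := pvSolve (l.take k)
    let hv_pv := pvSolve (l.drop k)
    (hu_pu.1 ++ (hv_pv.1.drop 1).map (fun h => PySem.Int.mod (hu_pu.1.getLast! + hu_pu.2 * h) pvM),
     PySem.Int.mod (hu_pu.2 * hv_pv.2) pvM)
termination_by l => l.length
decreasing_by
  · simp [List.length_take]; omega
  · simp [List.length_drop]; omega

def compute_hash_faster_alt (s : String) : List Int :=
  (pvSolve s.toList).1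

-- ===== PRECONDITION & SPEC =====
def Spec_compute_hash_faster (s : String) (out : List Int) : Prop := out = compute_hash_faster_alt s
instance (s : String) (out : List Int) : Decidable (Spec_compute_hash_faster s out) := by unfold Spec_compute_hash_faster; infer_instance

-- ===== CLAIM (what is proved, stated in full; the proofs are below) =====
def Claim_equal_compute_hash_faster : Prop := ∀ (s : String), Dom_compute_hash_faster s → Spec_compute_hash_faster s (compute_hash_faster s)

-- ===== LEMMAS AND PROOFS =====

-- the plain integer polynomial ∑ val l[i] * 53^i, Horner style
def pvS : List Char → Int
  | [] => 0
  | c :: cs => pvVal c + 53 * pvS cs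

-- the common reference value: the list of prefix hashes, by closed form
def pvR (l : List Char) : List Int :=
  (List.range (l.length + 1)).map (fun j => PySem.Int.mod (pvS (l.take j)) pvM)

theorem pvS_append (u v : List Char) : pvS (u ++ v) = pvS u + 53 ^ u.length * pvS v := by
  induction u with
  | nil => simp [pvS]
  | cons c cs ih => simp [pvS, ih, pow_succ]; ring

-- PySem.Int.mod by the positive pvM is emod
theorem pvMod_eq (a : Int) : PySem.Int.mod a pvM = a % pvM :=
  PySem.Int.mod_eq_emod_of_pos (by norm_num [pvM])

theorem pvMod_add_left (a b : Int) :
    PySem.Int.mod (PySem.Int.mod a pvM + b) pvM = PySem.Int.mod (a + b) pvM := by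
  simp only [pvMod_eq, Int.emod_add_emod]

theorem pvMod_mul_mod_left (x y z : Int) :
    PySem.Int.mod (x + PySem.Int.mod y pvM * z) pvM = PySem.Int.mod (x + y * z) pvM := by
  simp only [pvMod_eq]
  rw [Int.add_emod, Int.mul_emod, Int.emod_emod_of_dvd _ dvd_rfl, ← Int.mul_emod, ← Int.add_emod]

theorem pvMod_mul_mod_right (x y z : Int) :
    PySem.Int.mod (x + y * PySem.Int.mod z pvM) pvM = PySem.Int.mod (x + y * z) pvM := by
  simp only [pvMod_eq]
  rw [Int.add_emod, Int.mul_emod, Int.emod_emod_of_dvd _ dvd_rfl, ← Int.mul_emod, ← Int.add_emod]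

-- ===== A-side: A's two-loop fold equals the reference list =====

-- p53 k = 53^k mod m, as A's table builds it
def p53 : Nat → Int
  | 0 => 1
  | k + 1 => PySem.Int.mod (p53 k * 53) pvM

theorem p53_eq (k : Nat) : p53 k = PySem.Int.mod (53 ^ k) pvM := by
  induction k with
  | zero => simp [p53, pvMod_eq, pvM]
  | succ k ih =>
    rw [p53, ih, pow_succ]
    rw [show ∀ a b : Int, PySem.Int.mod (PySem.Int.mod a pvM * b) pvM = PySem.Int.mod (a * b) pvM
        from fun a b => by simpa using pvMod_mul_mod_left 0 a b]

-- the tail A's power_mod fold appends after x, b steps long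
def pvChain : Nat → Int → List Int
  | 0, _ => []
  | b + 1, x => PySem.Int.mod (x * 53) pvM :: pvChain b (PySem.Int.mod (x * 53) pvM)

theorem pvFold_chain (b : Nat) : ∀ (a : Nat) (l : List Int) (x : Int),
    (List.range' a b).foldl (fun acc _ => acc ++ [PySem.Int.mod (acc.getLast! * 53) pvM]) (l ++ [x])
      = l ++ x :: pvChain b x := by
  induction b with
  | zero => intro a l x; simp [pvChain]
  | succ b ih =>
    intro a l x
    have hlast : (l ++ [x]).getLast! = x := by simp
    rw [List.range'_succ]
    simp only [List.foldl_cons, hlast]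
    have := ih (a + 1) (l ++ [x]) (PySem.Int.mod (x * 53) pvM)
    simpa [pvChain] using this

theorem pvChain_getD (b : Nat) : ∀ (k j : Nat), j < b →
    (pvChain b (p53 k)).getD j 0 = p53 (k + 1 + j) := by
  induction b with
  | zero => intro k j h; omega
  | succ b ih =>
    intro k j h
    have hc : pvChain (b + 1) (p53 k) = p53 (k + 1) :: pvChain b (p53 (k + 1)) := by
      simp [pvChain, p53]
    rw [hc]
    cases j with
    | zero => simp
    | succ j =>
      have := ih (k + 1) j (by omega)
      simpa [Nat.add_assoc, Nat.add_comm, Nat.add_left_comm] using this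

-- power_mod.getD i 0 = p53 i for all accessed indices
theorem pvPower_getD (n : Nat) (i : Nat) (hi : i < n) :
    (((List.range' 1 (n - 1)).foldl
        (fun acc _ => acc ++ [PySem.Int.mod (acc.getLast! * 53) pvM]) [1]).getD i 0) = p53 i := by
  have h1 : ([] : List Int) ++ [(1 : Int)] = [1] := rfl
  rw [← h1, pvFold_chain (n - 1) 1 [] 1]
  cases i with
  | zero => simp [p53]
  | succ i =>
    have h53 : (1 : Int) = p53 0 := rfl
    simp only [List.nil_append, List.getD_cons_succ]
    rw [h53, pvChain_getD (n - 1) 0 i (by omega)]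
    congr 1
    omega

-- one-pass abstraction of A's index-writing loop (proof helper; neither port uses it)
def pvGoA : List Char → Int → Nat → List Int
  | [], _, _ => []
  | c :: cs, h, k =>
    let h' := PySem.Int.mod (h + pvVal c * p53 k) pvM
    h' :: pvGoA cs h' (k + 1)

-- getD just past a prefix of known length
theorem pvGetD_mid (pre : List Int) (l : List Int) (d : Int) :
    (pre ++ l).getD pre.length d = l.getD 0 d := by
  simp [List.getD, List.getElem?_append_right]

-- A's index-writing fold, started after a processed prefix, produces pvGoA's tail
theorem pvLoop (cs : List Char) : ∀ (k : Nat) (pre : List Int) (h : Int)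
    (chars : List Char) (pm : List Int),
    pre.length = k →
    (∀ j, j < cs.length → chars.getD (k + j) ' ' = cs.getD j ' ') →
    (∀ j, j < cs.length → pm.getD (k + j) 0 = p53 (k + j)) →
    (List.range' k cs.length).foldl
        (fun hv i =>
          hv.set (i + 1)
            (PySem.Int.mod (hv.getD i 0 + pvVal (chars.getD i ' ') * pm.getD i 0) pvM))
        (pre ++ h :: List.replicate cs.length 0)
      = pre ++ h :: pvGoA cs h k := by
  induction cs with
  | nil => intro k pre h chars pm hk _ _; simp [pvGoA]
  | cons c cs ih =>
    intro k pre h chars pm hk hchars hpm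
    simp only [List.length_cons]
    rw [List.range'_succ]
    simp only [List.foldl_cons]
    have hgetH : (pre ++ h :: 0 :: List.replicate cs.length 0).getD k 0 = h := by
      rw [← hk]
      simpa using pvGetD_mid pre (h :: 0 :: List.replicate cs.length 0) 0
    have hchar : chars.getD k ' ' = c := by
      have := hchars 0 (by simp)
      simp at this
      exact this
    have hpmk : pm.getD k 0 = p53 k := by
      have := hpm 0 (by simp)
      simpa using this
    have hrep : List.replicate (cs.length + 1) (0 : Int) = 0 :: List.replicate cs.length 0 := rfl
    rw [hrep, hgetH, hchar, hpmk]
    set h' := PySem.Int.mod (h + pvVal c * p53 k) pvM with hh'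
    have hset : (pre ++ h :: 0 :: List.replicate cs.length 0).set (k + 1) h'
        = (pre ++ [h]) ++ h' :: List.replicate cs.length 0 := by
      rw [List.set_append_right _ _ (by omega)]
      simp [hk]
    rw [hset]
    have ih' := ih (k + 1) (pre ++ [h]) h' chars pm (by simp [hk])
      (fun j hj => by
        have := hchars (j + 1) (by simp; omega)
        simpa [Nat.add_assoc, Nat.add_comm, Nat.add_left_comm] using this)
      (fun j hj => by
        have := hpm (j + 1) (by simp; omega)
        simpa [Nat.add_assoc, Nat.add_comm, Nat.add_left_comm] using this)
    rw [ih']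
    simp [pvGoA, hh']

-- pvGoA in closed form: its j-th entry is the reference prefix hash
theorem pvGoA_closed (l : List Char) : ∀ (h : Int) (k : Nat),
    pvGoA l h k = (List.range l.length).map
      (fun j => PySem.Int.mod (h + 53 ^ k * pvS (l.take (j + 1))) pvM) := by
  induction l with
  | nil => intro h k; simp [pvGoA]
  | cons c cs ih =>
    intro h k
    simp only [pvGoA]
    rw [ih]
    rw [List.length_cons, List.range_succ_eq_map, List.map_cons, List.map_map]
    congr 1
    · rw [p53_eq, pvMod_mul_mod_right]
      congr 1
      simp [pvS]
      ring
    · apply List.map_congr_left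
      intro j hj
      simp only [Function.comp]
      rw [pvMod_add_left, p53_eq]
      rw [show h + pvVal c * PySem.Int.mod (53 ^ k) pvM + 53 ^ (k + 1) * pvS (cs.take (j + 1))
            = (h + 53 ^ (k + 1) * pvS (cs.take (j + 1))) + pvVal c * PySem.Int.mod (53 ^ k) pvM
          from by ring]
      rw [pvMod_mul_mod_right]
      congr 1
      simp [pvS, List.take_succ_cons]
      ring

theorem pvA_eq_R (s : String) : compute_hash_faster s = pvR s.toList := by
  unfold compute_hash_faster
  simp only []
  rw [List.range_eq_range']
  have hrep : List.replicate (s.toList.length + 1) (0 : Int)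
      = ([] : List Int) ++ 0 :: List.replicate s.toList.length 0 := rfl
  rw [hrep]
  rw [pvLoop s.toList 0 [] 0 s.toList _ rfl (fun j hj => by simp)
    (fun j hj => by simpa using pvPower_getD s.toList.length j (by simpa using hj))]
  rw [pvGoA_closed]
  unfold pvR
  rw [List.range_succ_eq_map, List.map_cons, List.map_map]
  simp [pvS, pvMod_eq, pvM, Function.comp]

-- ===== B-side: pvSolve equals the reference list =====

theorem pvMod_mul_mul (a b : Int) :
    PySem.Int.mod (PySem.Int.mod a pvM * PySem.Int.mod b pvM) pvM = PySem.Int.mod (a * b) pvM := by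
  simp only [pvMod_eq]
  rw [← Int.mul_emod]

theorem pvR_last (l : List Char) : (pvR l).getLast! = PySem.Int.mod (pvS l) pvM := by
  unfold pvR
  rw [List.range_succ, List.map_append]
  simp

theorem pvR_append (u v : List Char) :
    pvR (u ++ v) = pvR u ++ ((pvR v).drop 1).map
      (fun h => PySem.Int.mod (PySem.Int.mod (pvS u) pvM + PySem.Int.mod (53 ^ u.length) pvM * h) pvM) := by
  unfold pvR
  rw [List.length_append, show u.length + v.length + 1 = (u.length + 1) + v.length from by omega]
  rw [List.range_add, List.map_append, List.map_map]
  congr 1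
  · apply List.map_congr_left
    intro j hj
    have hju : j ≤ u.length := by
      have := List.mem_range.mp hj; omega
    rw [List.take_append_of_le_length hju]
  · rw [List.range_succ_eq_map]
    simp only [List.map_cons, List.drop_succ_cons, List.drop_zero, List.map_map]
    apply List.map_congr_left
    intro i hi
    simp only [Function.comp]
    have ht : (u ++ v).take (u.length + 1 + i) = u ++ v.take (i + 1) := by
      rw [show u.length + 1 + i = u.length + (i + 1) from by omega]
      rw [List.take_append, List.take_of_length_le (by omega), Nat.add_sub_cancel_left]
    rw [ht, pvS_append]
    rw [pvMod_add_left, pvMod_mul_mod_left, pvMod_mul_mod_right]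

theorem pvSolve_eq_R_aux (n : Nat) : ∀ l : List Char, l.length ≤ n →
    pvSolve l = (pvR l, PySem.Int.mod (53 ^ l.length) pvM) := by
  induction n with
  | zero =>
    intro l hl
    match l with
    | [] => simp [pvSolve, pvR, pvS, pvMod_eq, pvM]
  | succ n ih =>
    intro l hl
    match l with
    | [] => simp [pvSolve, pvR, pvS, pvMod_eq, pvM]
    | [c] =>
      simp [pvSolve, pvR, pvS, pvMod_eq, pvM, List.range_succ]
    | c1 :: c2 :: rest =>
      simp only [pvSolve]
      have hlen : 2 ≤ (c1 :: c2 :: rest).length := by simp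
      have hk1 : 1 ≤ (c1 :: c2 :: rest).length / 2 := by omega
      have hk2 : (c1 :: c2 :: rest).length / 2 < (c1 :: c2 :: rest).length := by omega
      have h1 : ((c1 :: c2 :: rest).take ((c1 :: c2 :: rest).length / 2)).length ≤ n := by
        simp only [List.length_take]
        simp at hl ⊢
        omega
      have h2 : ((c1 :: c2 :: rest).drop ((c1 :: c2 :: rest).length / 2)).length ≤ n := by
        simp only [List.length_drop]
        simp at hl ⊢
        omega
      rw [ih _ h1, ih _ h2]
      simp only [Prod.mk.injEq]
      have hltk : ((c1 :: c2 :: rest).take ((c1 :: c2 :: rest).length / 2)).length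
          + ((c1 :: c2 :: rest).drop ((c1 :: c2 :: rest).length / 2)).length
          = (c1 :: c2 :: rest).length := by
        simp [List.length_take, List.length_drop]
        omega
      refine ⟨?_, ?_⟩
      · conv_rhs => rw [← List.take_append_drop ((c1 :: c2 :: rest).length / 2) (c1 :: c2 :: rest)]
        rw [pvR_append, pvR_last]
      · rw [pvMod_mul_mul, ← pow_add, hltk]

theorem pvSolve_eq_R (l : List Char) :
    pvSolve l = (pvR l, PySem.Int.mod (53 ^ l.length) pvM) :=
  pvSolve_eq_R_aux l.length l le_rfl

-- ===== VERDICT (by name: the statement is the Claim_ definition above) =====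
theorem compute_hash_faster_spec : Claim_equal_compute_hash_faster := by
  intro s _
  unfold Spec_compute_hash_faster compute_hash_faster_alt
  rw [pvA_eq_R, pvSolve_eq_R]
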